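-- pv_equiv track=rewrite | github.com/robertmassman/chiral-geometrogenesis-supplementary | verification/Phase5/theorem_5_3_2_index_and_lorentz.py | levi_civita_3d
-- ===== SOURCE A (Python) =====
-- def levi_civita_3d(i: int, j: int, k: int) -> int:
--     """
--     3D Levi-Civita symbol ε_{ijk} with ε_{123} = +1.
--     Uses 1-indexed (1,2,3) convention.
--     """
--     indices = [i, j, k]
--     if len(set(indices)) != 3 or min(indices) < 1 or max(indices) > 3:
--         return 0
--
--     # Count permutations from (1,2,3)
--     perm = 0
--     for a in range(3):
--         for b in range(a+1, 3):
--             if indices[a] > indices[b]: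
--                 perm += 1
--     return 1 if perm % 2 == 0 else -1
-- ===== SOURCE B (Python) =====
-- def levi_civita_3d(i: int, j: int, k: int) -> int:
--     """3D Levi-Civita symbol via the closed form (i-j)(j-k)(k-i)/2."""
--     if len({i, j, k}) != 3 or min(i, j, k) < 1 or max(i, j, k) > 3:
--         return 0
--     return (i - j) * (j - k) * (k - i) // 2
-- ===== Notes on version B (the rewrite author's own statement) =====
-- stated objective: simpler
-- what changed: Replaced the inversion-counting double loop over index pairs by the closed-form product (i-j)*(j-k)*(k-i)//2, keeping the same validity guard.
import Mathlib
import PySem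

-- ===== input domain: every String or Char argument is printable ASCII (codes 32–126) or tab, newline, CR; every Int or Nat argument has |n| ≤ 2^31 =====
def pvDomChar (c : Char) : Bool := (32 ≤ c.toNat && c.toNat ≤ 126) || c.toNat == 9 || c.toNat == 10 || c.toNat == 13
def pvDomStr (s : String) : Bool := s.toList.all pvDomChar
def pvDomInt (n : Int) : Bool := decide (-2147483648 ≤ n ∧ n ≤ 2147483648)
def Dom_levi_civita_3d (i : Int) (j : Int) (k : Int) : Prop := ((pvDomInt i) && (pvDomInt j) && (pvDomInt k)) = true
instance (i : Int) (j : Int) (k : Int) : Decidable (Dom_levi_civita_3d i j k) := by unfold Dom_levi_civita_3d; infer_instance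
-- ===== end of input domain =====

-- ===== PORT A =====
-- Literal port of A: guard (set size / min / max over the list), then the
-- inversion-counting double loop over range(3) pairs.
def levi_civita_3d (i : Int) (j : Int) (k : Int) : Int :=
  let indices : List Int := [i, j, k]
  if (PySem.Set.ofList indices).length ≠ 3 ∨
     ((PySem.List.min? indices (fun x => x)).getD 0) < 1 ∨
     ((PySem.List.max? indices (fun x => x)).getD 0) > 3 then 0
  else
    let perm : Int :=
      (PySem.List.pyRange 0 3 1).foldl (fun perm a =>
        (PySem.List.pyRange (a + 1) 3 1).foldl (fun perm b =>
          if ((PySem.List.pyGet? indices a).getD 0) > ((PySem.List.pyGet? indices b).getD 0)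
          then perm + 1 else perm) perm) 0
    if perm % 2 == 0 then 1 else -1

-- ===== PORT B =====
-- Port of B: the same guard, then the closed form (i-j)(j-k)(k-i) // 2.
def levi_civita_3d_alt (i : Int) (j : Int) (k : Int) : Int :=
  if (PySem.Set.ofList [i, j, k]).length ≠ 3 ∨
     min i (min j k) < 1 ∨ max i (max j k) > 3 then 0
  else PySem.Int.floordiv ((i - j) * (j - k) * (k - i)) 2

-- ===== PRECONDITION & SPEC =====
def Spec_levi_civita_3d (i : Int) (j : Int) (k : Int) (out : Int) : Prop := out = levi_civita_3d_alt i j k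
instance (i : Int) (j : Int) (k : Int) (out : Int) : Decidable (Spec_levi_civita_3d i j k out) := by unfold Spec_levi_civita_3d; infer_instance

-- ===== CLAIM (what is proved, stated in full; the proofs are below) =====
def Claim_equal_levi_civita_3d : Prop := ∀ (i : Int) (j : Int) (k : Int), Dom_levi_civita_3d i j k → Spec_levi_civita_3d i j k (levi_civita_3d i j k)

-- ===== LEMMAS AND PROOFS =====

-- len(set([i,j,k])) == 3 iff the three indices are pairwise distinct
theorem pv_setlen (i j k : Int) :
    (PySem.Set.ofList [i, j, k]).length = 3 ↔ (i ≠ j ∧ i ≠ k ∧ j ≠ k) := by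
  simp only [PySem.Set.ofList, PySem.Set.add, PySem.Set.contains, PySem.Set.empty,
    List.foldl_cons, List.foldl_nil]
  split_ifs <;> simp_all <;> omega

-- min([i,j,k]) as a plain binary min
theorem pv_min (i j k : Int) :
    (PySem.List.min? [i, j, k] (fun x => x)).getD 0 = min (min i j) k := by
  rw [PySem.List.min?_id_cons]
  simp [List.foldl_cons, List.foldl_nil]

-- max([i,j,k]) as a plain binary max
theorem pv_max (i j k : Int) :
    (PySem.List.max? [i, j, k] (fun x => x)).getD 0 = max (max i j) k := by
  rw [PySem.List.max?_id_cons]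
  simp [List.foldl_cons, List.foldl_nil]

-- ===== VERDICT (by name: the statement is the Claim_ definition above) =====
theorem levi_civita_3d_spec : Claim_equal_levi_civita_3d := by
  intro i j k _
  unfold Spec_levi_civita_3d
  by_cases h : i ≠ j ∧ j ≠ k ∧ i ≠ k ∧ 1 ≤ i ∧ i ≤ 3 ∧ 1 ≤ j ∧ j ≤ 3 ∧ 1 ≤ k ∧ k ≤ 3
  · obtain ⟨h1, h2, h3, h4, h5, h6, h7, h8, h9⟩ := h
    have hi : i = 1 ∨ i = 2 ∨ i = 3 := by omega
    have hj : j = 1 ∨ j = 2 ∨ j = 3 := by omega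
    have hk : k = 1 ∨ k = 2 ∨ k = 3 := by omega
    rcases hi with rfl | rfl | rfl <;> rcases hj with rfl | rfl | rfl <;>
      rcases hk with rfl | rfl | rfl <;> first | (exfalso; omega) | decide
  · -- the guard fires in both programs: both return 0
    have gB : (PySem.Set.ofList [i, j, k]).length ≠ 3 ∨
        min i (min j k) < 1 ∨ max i (max j k) > 3 := by
      by_cases hd : i ≠ j ∧ i ≠ k ∧ j ≠ k
      · right; omega
      · exact Or.inl (fun hlen => hd ((pv_setlen i j k).mp hlen))
    have gA : (PySem.Set.ofList [i, j, k]).length ≠ 3 ∨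
        ((PySem.List.min? [i, j, k] (fun x => x)).getD 0) < 1 ∨
        ((PySem.List.max? [i, j, k] (fun x => x)).getD 0) > 3 := by
      rw [pv_min, pv_max]
      rcases gB with g | g | g
      · exact Or.inl g
      · right; left; omega
      · right; right; omega
    show levi_civita_3d i j k = levi_civita_3d_alt i j k
    unfold levi_civita_3d levi_civita_3d_alt
    rw [if_pos gA, if_pos gB]
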